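-- pv_equiv track=rewrite | github.com/aviAVIRAL/MY_WORK | DSA/0 tcs/tcs_1_arr/18.3      practise       .py | f
-- ===== SOURCE A (Python) =====
-- from collections import OrderedDict
-- from collections import OrderedDict
--
-- def f(arr):
--     n = len(arr)
--     mp = OrderedDict()
--
--     for i in range(n):
--         if arr[i] in mp:
--             mp[arr[i]] +=1
--         else:
--             mp[arr[i]] = 1
--     return mp
-- ===== SOURCE B (Python) =====
-- from collections import OrderedDict
--
-- def f(arr):
--     out = OrderedDict()
--     for k in dict.fromkeys(arr):
--         out[k] = arr.count(k)
--     return out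
-- ===== Notes on version B (the rewrite author's own statement) =====
-- stated objective: alternative
-- what changed: B first builds the distinct keys in first-occurrence order with dict.fromkeys, then fills an OrderedDict with arr.count(k) per key (build-index-then-rescan), instead of A's single incremental membership-test-and-increment pass.
import Mathlib
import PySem

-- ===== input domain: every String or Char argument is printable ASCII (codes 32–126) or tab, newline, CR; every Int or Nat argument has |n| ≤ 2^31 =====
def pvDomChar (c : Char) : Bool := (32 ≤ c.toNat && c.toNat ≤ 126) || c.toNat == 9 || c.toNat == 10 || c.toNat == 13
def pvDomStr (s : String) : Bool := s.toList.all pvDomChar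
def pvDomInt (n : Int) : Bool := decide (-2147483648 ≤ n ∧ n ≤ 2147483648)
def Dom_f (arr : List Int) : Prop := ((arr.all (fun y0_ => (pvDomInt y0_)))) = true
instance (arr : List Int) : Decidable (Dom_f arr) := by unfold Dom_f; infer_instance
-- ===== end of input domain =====

-- B builds the distinct keys first (dict.fromkeys) and then rescans arr with count per key,
-- instead of A's single incremental increment pass; same OrderedDict result.

-- ===== PORT A =====
def f (arr : List Int) : List (Int × Int) :=
  let n : Int := PySem.List.len arr
  ((PySem.List.pyRange 0 n 1).foldl
    (fun mp i =>
      let x := PySem.List.pyGetD arr i 0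
      if mp.contains x then mp.insert x (mp.getD x 0 + 1) else mp.insert x 1)
    PySem.Dict.empty).items

-- ===== PORT B =====
def f_alt (arr : List Int) : List (Int × Int) :=
  ((PySem.List.dedup arr).foldl
    (fun out k => out.insert k ((arr.count k : Int)))
    PySem.Dict.empty).items

-- ===== PRECONDITION & SPEC =====
def Spec_f (arr : List Int) (out : List (Int × Int)) : Prop := out = f_alt arr
instance (arr : List Int) (out : List (Int × Int)) : Decidable (Spec_f arr out) := by unfold Spec_f; infer_instance

-- ===== CLAIM (what is proved, stated in full; the proofs are below) =====
def Claim_equal_f : Prop := ∀ (arr : List Int), Dom_f arr → Spec_f arr (f arr)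

-- ===== LEMMAS AND PROOFS =====

-- A's loop body, collapsed: both branches insert x with value (old count + 1).
theorem f_step_eq (d : PySem.Dict Int Int) (x : Int) :
    (if d.contains x then d.insert x (d.getD x 0 + 1) else d.insert x 1)
      = d.insert x (d.getD x 0 + 1) := by
  by_cases h : d.contains x = true
  · simp [h]
  · simp only [Bool.not_eq_true] at h
    rw [if_neg (by simp [h]), PySem.Dict.getD_of_not_contains (h := h)]
    norm_num

theorem f_eq_counter_items (arr : List Int) :
    f arr = (PySem.Dict.counter arr).items := by
  simp only [f]
  have h := PySem.List.foldl_pyRange_pyGetD (xs := arr) (d := 0)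
      (f := fun (mp : PySem.Dict Int Int) x =>
        if mp.contains x then mp.insert x (mp.getD x 0 + 1) else mp.insert x 1)
      (init := PySem.Dict.empty) (a := 0) (le_refl 0)
  simp only [Int.toNat_zero, List.drop_zero] at h
  rw [h]
  have hf : (fun (mp : PySem.Dict Int Int) x =>
      if mp.contains x then mp.insert x (mp.getD x 0 + 1) else mp.insert x 1)
      = fun mp x => mp.insert x (mp.getD x 0 + 1) := by
    funext d x; exact f_step_eq d x
  rw [hf, PySem.Dict.foldl_insert_getD_add_one_eq_counter]


theorem f_alt_eq (arr : List Int) :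
    f_alt arr = (PySem.Set.ofList arr).map (fun k => (k, (arr.count k : Int))) := by
  unfold f_alt
  rw [PySem.List.dedup_eq_ofList]
  have h := PySem.Dict.items_foldl_insert_fresh (l := PySem.Set.ofList arr)
      (k := fun a => a) (v := fun a => (arr.count a : Int)) (d := PySem.Dict.empty)
      (by intro a _; exact PySem.Dict.contains_empty a)
      (by simpa using PySem.Set.nodup_ofList arr)
  simp at h; exact h

-- ===== VERDICT (by name: the statement is the Claim_ definition above) =====
theorem f_spec : Claim_equal_f := by
  intro arr _
  unfold Spec_f
  rw [f_eq_counter_items, f_alt_eq, PySem.Dict.items_counter]
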